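-- pv_equiv track=rewrite | github.com/expeyes/expeyes-programs | eyes17/scope.py | peak_index
-- ===== SOURCE A (Python) =====
-- def peak_index(xa, ya):
-- 	peak = 0
-- 	peak_index = 0
-- 	for k in range(2,len(ya)):
-- 		if ya[k] > peak:
-- 			peak = ya[k]
-- 			peak_index = xa[k]
-- 	return peak_index
-- ===== SOURCE B (Python) =====
-- def peak_index(xa, ya):
--     sub = ya[2:]
--     if not sub:
--         return 0
--     m = max(sub)
--     if m <= 0:
--         return 0
--     for k in range(2, len(ya)):
--         if ya[k] == m:
--             return xa[k]
-- ===== Notes on version B (the rewrite author's own statement) =====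
-- stated objective: alternative
-- what changed: Replaces A's single scan that tracks a running (peak, peak_index) pair with a two-phase computation: first take the maximum of ya[2:], then (if positive) locate its first occurrence and return the paired xa value.
import Mathlib
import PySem

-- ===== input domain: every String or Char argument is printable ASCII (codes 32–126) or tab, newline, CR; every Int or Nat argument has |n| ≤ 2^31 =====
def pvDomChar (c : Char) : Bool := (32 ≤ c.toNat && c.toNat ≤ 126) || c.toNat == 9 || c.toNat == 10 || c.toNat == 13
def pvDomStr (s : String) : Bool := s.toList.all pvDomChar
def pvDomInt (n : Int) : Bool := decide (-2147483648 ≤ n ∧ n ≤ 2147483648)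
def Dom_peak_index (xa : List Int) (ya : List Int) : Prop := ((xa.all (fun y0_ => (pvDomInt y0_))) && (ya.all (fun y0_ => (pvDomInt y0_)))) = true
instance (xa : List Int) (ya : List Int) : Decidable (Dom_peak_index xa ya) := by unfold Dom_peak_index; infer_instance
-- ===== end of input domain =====

-- B replaces A's single tracking scan with a two-phase max-then-locate computation (alternative decomposition, same cost).

-- ===== PORT A =====
-- literal port of A's loop: running (peak, peak_index) pair over k in range(2, len(ya))
def peak_index (xa : List Int) (ya : List Int) : Int :=
  ((PySem.List.pyRange 2 (ya.length : Int) 1).foldl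
    (fun (st : Int × Int) k =>
      if PySem.List.pyGetD ya k 0 > st.1
      then (PySem.List.pyGetD ya k 0, PySem.List.pyGetD xa k 0)
      else st)
    (0, 0)).2

-- ===== PORT B =====
-- literal port of Source B: sub = ya[2:]; m = max(sub); if m > 0 return xa[k] at the first k ≥ 2 with ya[k] == m
-- (the `none` branch of the find? match is unreachable: m is an element of ya[2:])
def peak_index_alt (xa : List Int) (ya : List Int) : Int :=
  if PySem.List.slice ya (some 2) none = [] then 0
  else
    -- m = max(sub); sub is nonempty here, so max? is always `some` (the `.getD 0` default is never used)
    if (PySem.List.max? (PySem.List.slice ya (some 2) none) (fun y => y)).getD 0 ≤ 0 then 0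
    else
      -- the for-loop: return xa[k] at the first k in range(2, len(ya)) with ya[k] == m (always found: m ∈ ya[2:])
      (((PySem.List.pyRange 2 (ya.length : Int) 1).find?
          (fun k => PySem.List.pyGetD ya k 0 == (PySem.List.max? (PySem.List.slice ya (some 2) none) (fun y => y)).getD 0)).map
        (fun k => PySem.List.pyGetD xa k 0)).getD 0

-- ===== PRECONDITION & SPEC =====
-- Pre_ excludes exactly the inputs on which Python A raises IndexError: A reads xa[k] precisely when
-- ya[k] beats the running peak max(0, max(ya[2:k])), so A raises iff some index k ≥ len(xa) does so.
def Pre_peak_index (xa : List Int) (ya : List Int) : Prop :=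
  ∀ k : Nat, k < ya.length → 2 ≤ k → xa.length ≤ k →
    ya.getD k 0 ≤ ((ya.drop 2).take (k - 2)).foldl max 0

instance (xa : List Int) (ya : List Int) : Decidable (Pre_peak_index xa ya) := by
  unfold Pre_peak_index; infer_instance

def pvWitness_peak_index : List Int × List Int := ([10, 20, 30, 40], [0, 0, 1, 3])

def Spec_peak_index (xa : List Int) (ya : List Int) (out : Int) : Prop := out = peak_index_alt xa ya
instance (xa : List Int) (ya : List Int) (out : Int) : Decidable (Spec_peak_index xa ya out) := by
  unfold Spec_peak_index; infer_instance

-- ===== CLAIM (what is proved, stated in full; the proofs are below) =====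
def Claim_equal_peak_index : Prop := ∀ (xa : List Int) (ya : List Int), Dom_peak_index xa ya → Pre_peak_index xa ya → Spec_peak_index xa ya (peak_index xa ya)

-- ===== LEMMAS AND PROOFS =====

lemma le_foldl_max' (p : Int) (t : List Int) : p ≤ t.foldl max p := by
  induction t generalizing p with
  | nil => simp
  | cons y ys ih => simpa using le_trans (le_max_left p y) (ih (max p y))

lemma foldl_max_comm (a b : Int) (t : List Int) : t.foldl max (max a b) = max a (t.foldl max b) := by
  induction t generalizing b with
  | nil => simp
  | cons y ys ih =>
    simp only [List.foldl_cons]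
    rw [max_assoc]
    exact ih (max b y)

-- A's loop, restated as structural recursion over the suffix t = ya.drop j (st = (peak, peak_index))
def aLoop (xa : List Int) (t : List Int) (j : Int) (st : Int × Int) : Int × Int :=
  match t with
  | [] => st
  | y :: ys =>
    if y > st.1 then aLoop xa ys (j + 1) (y, PySem.List.pyGetD xa j 0)
    else aLoop xa ys (j + 1) st

lemma foldA (xa ya : List Int) : ∀ (j : Nat) (st : Int × Int), j ≤ ya.length →
    (PySem.List.pyRange (j : Int) (ya.length : Int) 1).foldl
      (fun (st : Int × Int) k =>
        if PySem.List.pyGetD ya k 0 > st.1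
        then (PySem.List.pyGetD ya k 0, PySem.List.pyGetD xa k 0)
        else st) st
    = aLoop xa (ya.drop j) (j : Int) st := by
  intro j st hj
  induction hn : ya.length - j generalizing j st with
  | zero =>
    have hje : j = ya.length := by omega
    subst hje
    rw [PySem.List.pyRange_one_eq_nil (by omega)]
    simp [aLoop]
  | succ n ih =>
    have hjlt : j < ya.length := by omega
    rw [PySem.List.pyRange_one_cons (by exact_mod_cast hjlt)]
    rw [List.foldl_cons]
    have hget : PySem.List.pyGetD ya (j : Int) 0 = ya[j] := by
      rw [PySem.List.pyGetD_natCast]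
      exact List.getD_eq_getElem ya 0 hjlt
    have hdrop : ya.drop j = ya[j] :: ya.drop (j + 1) := (List.getElem_cons_drop hjlt).symm
    have hcast : (j : Int) + 1 = ((j + 1 : Nat) : Int) := by push_cast; ring
    rw [hdrop, aLoop, hget, hcast]
    by_cases hc : ya[j] > st.1
    · rw [if_pos hc, if_pos hc]
      exact ih (j + 1) _ (by omega) (by omega)
    · rw [if_neg hc, if_neg hc]
      exact ih (j + 1) _ (by omega) (by omega)

lemma findB (ya : List Int) (m : Int) : ∀ (j : Nat), j ≤ ya.length →
    (PySem.List.pyRange (j : Int) (ya.length : Int) 1).find?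
      (fun k => PySem.List.pyGetD ya k 0 == m)
    = if m ∈ ya.drop j then some ((j : Int) + ((ya.drop j).idxOf m : Int)) else none := by
  intro j hj
  induction hn : ya.length - j generalizing j with
  | zero =>
    have hje : j = ya.length := by omega
    subst hje
    rw [PySem.List.pyRange_one_eq_nil (by omega)]
    simp
  | succ n ih =>
    have hjlt : j < ya.length := by omega
    rw [PySem.List.pyRange_one_cons (by exact_mod_cast hjlt)]
    have hget : PySem.List.pyGetD ya (j : Int) 0 = ya[j] := by
      rw [PySem.List.pyGetD_natCast]
      exact List.getD_eq_getElem ya 0 hjlt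
    have hdrop : ya.drop j = ya[j] :: ya.drop (j + 1) := (List.getElem_cons_drop hjlt).symm
    have hcast : (j : Int) + 1 = ((j + 1 : Nat) : Int) := by push_cast; ring
    by_cases hc : ya[j] = m
    · rw [List.find?_cons_of_pos (by simp [hget, hc])]
      rw [hdrop, hc]
      simp
    · rw [List.find?_cons_of_neg (by simp [hget, hc])]
      rw [hcast, ih (j + 1) (by omega) (by omega), hdrop]
      by_cases hm : m ∈ ya.drop (j + 1)
      · rw [if_pos hm, if_pos (show m ∈ ya[j] :: ya.drop (j + 1) from List.mem_cons_of_mem _ hm)]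
        rw [List.idxOf_cons_ne _ hc]
        congr 1
        push_cast
        ring
      · rw [if_neg hm, if_neg (by simp only [List.mem_cons, not_or]; exact ⟨fun h => hc h.symm, hm⟩)]

-- characterisation of A's loop: the final peak_index is xa at the first index of the overall max (if it beats p)
lemma aLoop_eq (xa : List Int) : ∀ (t : List Int) (j : Int) (p pi : Int),
    (aLoop xa t j (p, pi)).2
    = if t.foldl max p > p then PySem.List.pyGetD xa (j + (t.idxOf (t.foldl max p) : Int)) 0 else pi := by
  intro t
  induction t with
  | nil => intro j p pi; simp [aLoop]
  | cons y ys ih =>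
    intro j p pi
    rw [List.foldl_cons]
    by_cases hy : y > p
    · rw [aLoop, if_pos hy, ih]
      rw [max_eq_right hy.le]
      have hM : y ≤ ys.foldl max y := le_foldl_max' y ys
      by_cases hMy : ys.foldl max y > y
      · rw [if_pos hMy, if_pos (by omega)]
        rw [List.idxOf_cons_ne _ (show y ≠ ys.foldl max y by omega)]
        congr 1
        push_cast
        ring
      · have hMey : ys.foldl max y = y := by omega
        rw [if_neg hMy, hMey, if_pos hy]
        rw [List.idxOf_cons_self]
        simp
    · rw [aLoop, if_neg hy, ih]
      rw [max_eq_left (by omega)]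
      by_cases hMp : ys.foldl max p > p
      · rw [if_pos hMp, if_pos hMp]
        rw [List.idxOf_cons_ne _ (show y ≠ ys.foldl max p by omega)]
        congr 1
        push_cast
        ring
      · rw [if_neg hMp, if_neg hMp]

-- ===== VERDICT (by name: the statement is the Claim_ definition above) =====
theorem peak_index_spec : Claim_equal_peak_index := by
  intro xa ya _ _
  unfold Spec_peak_index peak_index peak_index_alt
  rw [PySem.List.slice_from ya (a := 2) (by norm_num)]
  have ht2 : ((2 : Int)).toNat = 2 := rfl
  rw [ht2]
  by_cases hlen : ya.length ≤ 2
  · rw [PySem.List.pyRange_one_eq_nil (by exact_mod_cast hlen)]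
    have hnil : ya.drop 2 = [] := List.drop_eq_nil_of_le hlen
    simp [hnil]
  · have hlen2 : 2 ≤ ya.length := by omega
    have h2 : (2 : Int) = ((2 : Nat) : Int) := by norm_num
    rw [h2, foldA xa ya 2 (0, 0) hlen2, aLoop_eq]
    have hne : ya.drop 2 ≠ [] := by
      intro h
      have := List.drop_eq_nil_iff.mp h
      omega
    obtain ⟨x, t', hxt⟩ := List.exists_cons_of_ne_nil hne
    rw [if_neg hne]
    have hmax : PySem.List.max? (ya.drop 2) (fun y => y) = some (t'.foldl max x) := by
      rw [hxt]; exact PySem.List.max?_id_cons x t'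
    rw [hmax]
    simp only [Option.getD_some]
    have hfe0 : (ya.drop 2).foldl max 0 = max 0 (t'.foldl max x) := by
      rw [hxt, List.foldl_cons, ← foldl_max_comm]
    rw [hfe0]
    by_cases hm0 : t'.foldl max x ≤ 0
    · rw [max_eq_left hm0, if_pos hm0]
      norm_num
    · have hmx : max 0 (t'.foldl max x) = t'.foldl max x := max_eq_right (by omega)
      rw [hmx, if_neg hm0, if_pos (by omega : t'.foldl max x > 0)]
      have hmem : t'.foldl max x ∈ ya.drop 2 := PySem.List.max?_mem hmax
      rw [findB ya (t'.foldl max x) 2 hlen2, if_pos hmem]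
      simp only [Option.map_some, Option.getD_some]
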